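-- pv_equiv track=rewrite | github.com/cosmina98/PhD | 2022/Nov/Kernels/utils.py | count_commons
-- ===== SOURCE A (Python) =====
-- from collections import Counter
-- from typing import (
--     List,
--     Dict,
--     Tuple,
--     Iterable,
--     Union,
--     Set,
-- )
--
-- def count_commons(a: Iterable, b: Iterable) -> int:
--     'Return the number of common elements in the two iterables'
--     uniques = set(a).intersection(set(b))
--     counter_a = Counter(a)
--     counter_b = Counter(b)
--     commons = 0
--     for u in uniques:
--         commons += counter_a[u] * counter_b[u]
--     return commons
-- ===== SOURCE B (Python) =====
-- def count_commons(a, b):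
--     'Return the number of common elements in the two iterables'
--     commons = 0
--     for x in b:
--         commons += a.count(x)
--     return commons
-- ===== Notes on version B (the rewrite author's own statement) =====
-- stated objective: simpler
-- what changed: Drops the sets, the intersection and both Counters entirely: a single pass over b accumulating a.count(x) per element (non-common elements contribute 0).
import Mathlib
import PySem

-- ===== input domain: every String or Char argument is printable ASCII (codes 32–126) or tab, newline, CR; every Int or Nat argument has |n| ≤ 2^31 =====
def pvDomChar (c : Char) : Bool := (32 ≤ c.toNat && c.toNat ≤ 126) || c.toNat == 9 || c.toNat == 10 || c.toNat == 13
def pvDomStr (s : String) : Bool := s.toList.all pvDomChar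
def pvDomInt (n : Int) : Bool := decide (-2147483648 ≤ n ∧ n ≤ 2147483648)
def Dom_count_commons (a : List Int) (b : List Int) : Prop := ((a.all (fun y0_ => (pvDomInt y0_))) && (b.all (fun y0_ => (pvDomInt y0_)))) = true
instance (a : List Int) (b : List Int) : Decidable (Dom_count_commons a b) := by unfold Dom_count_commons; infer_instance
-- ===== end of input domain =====

-- B drops the sets, the intersection and both Counters: one pass over b adding a.count(x) per element (simpler; not faster).

-- ===== PORT A =====
def count_commons (a : List Int) (b : List Int) : Int :=
  let uniques := PySem.Set.inter (PySem.Set.ofList a) (PySem.Set.ofList b)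
  let counter_a := PySem.Dict.counter a
  let counter_b := PySem.Dict.counter b
  uniques.foldl (fun commons u => commons + counter_a.getD u 0 * counter_b.getD u 0) 0

-- ===== PORT B =====
def count_commons_alt (a : List Int) (b : List Int) : Int :=
  b.foldl (fun commons x => commons + PySem.List.count a x) 0

-- ===== PRECONDITION & SPEC =====
def Spec_count_commons (a : List Int) (b : List Int) (out : Int) : Prop := out = count_commons_alt a b
instance (a : List Int) (b : List Int) (out : Int) : Decidable (Spec_count_commons a b out) := by unfold Spec_count_commons; infer_instance

-- ===== CLAIM =====
def Claim_equal_count_commons : Prop := ∀ (a : List Int) (b : List Int), Dom_count_commons a b → Spec_count_commons a b (count_commons a b)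

-- ===== LEMMAS AND PROOFS =====

theorem pv_foldl_add_eq_sum (f : Int → Int) : ∀ (l : List Int) (c : Int),
    l.foldl (fun s x => s + f x) c = c + (l.map f).sum := by
  intro l
  induction l with
  | nil => intro c; simp
  | cons x xs ih => intro c; simp [List.foldl_cons, ih]; ring

theorem pv_sum_counts (a b : List Int) :
    ((PySem.Set.inter (PySem.Set.ofList a) (PySem.Set.ofList b)).map
        (fun u => ((a.count u : Int)) * (b.count u : Int))).sum
      = (b.map (fun x => (a.count x : Int))).sum := by
  set S := PySem.Set.inter (PySem.Set.ofList a) (PySem.Set.ofList b) with hS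
  have hnodup : S.Nodup := PySem.Set.nodup_inter _ _ (PySem.Set.nodup_ofList a)
  have hmem : ∀ x, x ∈ S ↔ x ∈ a ∧ x ∈ b := by
    intro x
    rw [hS, PySem.Set.mem_inter, PySem.Set.mem_ofList, PySem.Set.mem_ofList]
  rw [← List.sum_toFinset _ hnodup]
  rw [Finset.sum_list_map_count]
  have hsub : S.toFinset ⊆ b.toFinset := by
    intro u hu
    simp only [List.mem_toFinset] at *
    exact ((hmem u).1 hu).2
  rw [← Finset.sum_subset hsub ?h]
  · apply Finset.sum_congr rfl
    intro u _
    simp [mul_comm]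
  · intro u hub huS
    simp only [List.mem_toFinset] at hub huS
    have hua : u ∉ a := fun h => huS ((hmem u).2 ⟨h, hub⟩)
    simp [List.count_eq_zero_of_not_mem hua]

-- ===== VERDICT =====
theorem count_commons_spec : Claim_equal_count_commons := by
  intro a b _
  show count_commons a b = count_commons_alt a b
  unfold count_commons count_commons_alt
  simp only [PySem.Dict.getD_counter, PySem.List.count_eq]
  rw [pv_foldl_add_eq_sum (fun u => ((a.count u : Int)) * (b.count u : Int)),
      pv_foldl_add_eq_sum (fun x => (a.count x : Int)), zero_add, zero_add]
  exact pv_sum_counts a b
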